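-- pv_equiv track=rewrite | github.com/sermpezis/bgp-estimation | peering_experiments/monitor_min_paths.py | remove_loops
-- ===== SOURCE A (Python) =====
-- def remove_loops(AS_PATH):
--     """
--     Cleans loops that are found in the AS_PATH as result of BGP poisoning
--
--     Input: AS_PATH (list of positive integers)
--     Output: cleared list
--
--     """
--     seq_inv = AS_PATH[::-1]
--     new_seq_inv = []
--     for x in seq_inv:
--         if x not in new_seq_inv:
--             new_seq_inv.append(x)
--         else:
--             x_index = new_seq_inv.index(x)
--             new_seq_inv = new_seq_inv[: x_index + 1]
--     return new_seq_inv[::-1]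
-- ===== SOURCE B (Python) =====
-- def remove_loops(AS_PATH):
--     """Reverse once, then sweep a cursor over a single in-place list:
--     when the first occurrence of the current value lies before the cursor,
--     a loop closes here, so delete the segment between them and resume
--     right after that first occurrence."""
--     seq = AS_PATH[::-1]
--     i = 0
--     while i < len(seq):
--         j = seq.index(seq[i])
--         if j < i:
--             del seq[j + 1 : i + 1]
--             i = j + 1
--         else:
--             i += 1
--     return seq[::-1]
-- ===== Notes on version B (the rewrite author's own statement) =====
-- stated objective: alternative
-- what changed: Instead of building a fresh stack with membership tests, appends and prefix re-slicing, B sweeps a cursor over a single in-place copy of the reversed path and deletes each loop's segment (del seq[j+1:i+1]) the moment the first occurrence of the current value is found before the cursor.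
import Mathlib
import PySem

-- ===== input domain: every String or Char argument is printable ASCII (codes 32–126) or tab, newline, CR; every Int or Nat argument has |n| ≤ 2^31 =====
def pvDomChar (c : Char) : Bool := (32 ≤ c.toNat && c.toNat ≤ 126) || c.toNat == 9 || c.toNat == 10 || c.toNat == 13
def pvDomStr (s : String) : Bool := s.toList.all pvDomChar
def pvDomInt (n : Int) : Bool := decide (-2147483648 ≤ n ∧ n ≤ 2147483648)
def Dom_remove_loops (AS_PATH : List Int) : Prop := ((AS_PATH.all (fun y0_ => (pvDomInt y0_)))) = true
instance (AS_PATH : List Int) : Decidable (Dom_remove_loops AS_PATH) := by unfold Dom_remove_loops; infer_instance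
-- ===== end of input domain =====

-- B replaces A's fresh append/truncate stack by a single cursor sweeping one
-- in-place list, deleting a closed loop's segment as soon as it closes
-- (objective: alternative decomposition, same asymptotic cost).
-- Neither implementation mutates the caller's list.

-- ===== PORT A =====
-- one iteration of A's for-loop over seq_inv, state = new_seq_inv
def aStep (acc : List Int) (x : Int) : List Int :=
  if x ∉ acc then acc ++ [x]
  else
    -- x ∈ acc here, so new_seq_inv.index(x) succeeds; none is unreachable
    match PySem.List.index? acc x with
    | some i => PySem.List.slice acc none (some ((i : Int) + 1))   -- new_seq_inv[: x_index + 1]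
    | none => acc

def remove_loops (AS_PATH : List Int) : List Int :=
  -- AS_PATH[::-1] is List.reverse
  ((AS_PATH.reverse).foldl aStep []).reverse

-- ===== PORT B =====
-- B's while-loop over the mutable list seq with cursor i (i is always ≥ 0 and the
-- loop body reads seq[i] only under i < len(seq), so the cursor is carried as a Nat;
-- del seq[j+1:i+1] is exactly take (j+1) ++ drop (i+1) for these in-range indices;
-- fuel is only a totality guard: 2*len(seq) bounds the loop's step count, proved in
-- bLoop_eq_foldl below)
def bLoop : Nat → List Int → Nat → List Int
  | 0, seq, _ => seq
  | fuel + 1, seq, i =>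
    if h : i < seq.length then
      match PySem.List.index? seq seq[i] with
      | some j =>
          if j < i then
            bLoop fuel (seq.take (j + 1) ++ seq.drop (i + 1)) (j + 1)
          else
            bLoop fuel seq (i + 1)
      | none => seq   -- unreachable: seq[i] is an element of seq, so .index succeeds
    else seq

def remove_loops_alt (AS_PATH : List Int) : List Int :=
  (bLoop (2 * AS_PATH.length) AS_PATH.reverse 0).reverse

-- ===== PRECONDITION & SPEC =====
def Spec_remove_loops (AS_PATH : List Int) (out : List Int) : Prop := out = remove_loops_alt AS_PATH
instance (AS_PATH : List Int) (out : List Int) : Decidable (Spec_remove_loops AS_PATH out) := by unfold Spec_remove_loops; infer_instance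

-- ===== CLAIM (what is proved, stated in full; the proofs are below) =====
def Claim_equal_remove_loops : Prop := ∀ (AS_PATH : List Int), Dom_remove_loops AS_PATH → Spec_remove_loops AS_PATH (remove_loops AS_PATH)

-- ===== LEMMAS AND PROOFS =====

theorem index?_append_cons_self_of_not_mem (S R : List Int) (x : Int) (hx : x ∉ S) :
    PySem.List.index? (S ++ x :: R) x = some S.length := by
  rw [show S ++ x :: R = (S ++ [x]) ++ R by simp]
  rw [PySem.List.index?_append_of_mem R (by simp)]
  exact PySem.List.index?_append_singleton_self S x hx

-- B's sweep, started at the boundary between the already-clean prefix S and the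
-- rest R, computes exactly A's fold of R from stack S (with enough fuel).
theorem bLoop_eq_foldl (fuel : Nat) (R S : List Int) (hnd : S.Nodup)
    (hf : S.length + 2 * R.length ≤ fuel) :
    bLoop fuel (S ++ R) S.length = R.foldl aStep S := by
  induction fuel generalizing R S with
  | zero =>
      have hS : S = [] := List.length_eq_zero_iff.mp (by omega)
      have hR : R = [] := List.length_eq_zero_iff.mp (by omega)
      subst hS; subst hR
      rfl
  | succ fuel ih =>
      cases R with
      | nil => simp [bLoop]
      | cons x R' =>
          have hlen : S.length < (S ++ x :: R').length := by simp
          simp only [bLoop, dif_pos hlen]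
          have hget : (S ++ x :: R')[S.length] = x := by simp
          rw [hget]
          by_cases hmem : x ∈ S
          · -- duplicate: A truncates the stack, B deletes the segment
            obtain ⟨j, hj⟩ := Option.isSome_iff_exists.mp ((PySem.List.index?_isSome_iff S x).mpr hmem)
            have hidx : PySem.List.index? (S ++ x :: R') x = some j := by
              rw [PySem.List.index?_append_of_mem _ hmem, hj]
            obtain ⟨hjlt, -, -⟩ := PySem.List.getElem_of_index?_eq_some hj
            rw [hidx]
            simp only [hjlt, if_pos]
            have htd : (S ++ x :: R').take (j + 1) ++ (S ++ x :: R').drop (S.length + 1)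
                = S.take (j + 1) ++ R' := by
              rw [List.take_append_of_le_length (by omega),
                  show S ++ x :: R' = (S ++ [x]) ++ R' by simp,
                  show S.length + 1 = (S ++ [x]).length by simp, List.drop_left]
            have hlen2 : (S.take (j + 1)).length = j + 1 := by
              simp; omega
            have hstep : aStep S x = S.take (j + 1) := by
              simp only [aStep, hmem, not_true_eq_false, if_false, hj]
              have := PySem.List.slice_to_natCast S (j + 1)
              push_cast at this
              exact this
            have hrec := ih R' (S.take (j + 1)) (hnd.sublist (List.take_sublist _ _))
              (by rw [hlen2]; simp at hf ⊢; omega)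
            rw [hlen2] at hrec
            rw [htd, hrec, List.foldl_cons, hstep]
          · -- new element: A appends, B advances the cursor
            rw [index?_append_cons_self_of_not_mem S R' x hmem]
            simp only [lt_irrefl, if_neg, not_false_iff]
            have hform : S ++ x :: R' = (S ++ [x]) ++ R' := by simp
            have hlen3 : S.length + 1 = (S ++ [x]).length := by simp
            have hnd' : (S ++ [x]).Nodup := by
              simp [List.nodup_append, hnd]
              exact fun a ha hax => hmem (hax ▸ ha)
            have hrec := ih R' (S ++ [x]) hnd' (by simp at hf ⊢; omega)
            rw [hform, hlen3, hrec, List.foldl_cons]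
            have hstep : aStep S x = S ++ [x] := by
              simp [aStep, hmem]
            rw [hstep]

-- ===== VERDICT (by name: the statement is the Claim_ definition above) =====
theorem remove_loops_spec : Claim_equal_remove_loops := by
  intro AS_PATH _
  unfold Spec_remove_loops remove_loops remove_loops_alt
  have h := bLoop_eq_foldl (2 * AS_PATH.length) AS_PATH.reverse [] List.nodup_nil
    (by simp)
  simp only [List.nil_append, List.length_nil] at h
  rw [h]
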